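-- pv_equiv track=rewrite | github.com/shinohara-itg/ResearchPlanning4 | ResearchPlanning4.py | build_survey_versions_from_rows
-- ===== SOURCE A (Python) =====
-- def build_survey_versions_from_rows(rows: list[dict]) -> dict:
--     """
--     survey_item_rows から 10/20/30/40 問バージョンを再構成する。
--     priority（小さいほど重要）→SQ順の安定ソートで上位から切り出し。
--     """
--     if not rows:
--         return {"10問": "", "20問": "", "30問": "", "40問": ""}
--
--     # 安定ソート（priority→sq_id→var_name）
--     def key_fn(r: dict):
--         return (
--             int(r.get("priority", 3)),
--             str(r.get("sq_id", "")),
--             str(r.get("var_name", "")),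
--             str(r.get("item_text", "")),
--         )
--
--     sorted_rows = sorted(rows, key=key_fn)
--
--     def to_text(n: int) -> str:
--         picked = sorted_rows[:n]
--         lines = []
--         for r in picked:
--             sq = r.get("sq_id", "")
--             item = r.get("item_text", "")
--             if not item:
--                 continue
--             # 紐づけが見えるように SQ を先頭に付与
--             lines.append(f"・[{sq}] {item}")
--         return "\n".join(lines)
--
--     return {
--         "10問": to_text(10),
--         "20問": to_text(20),
--         "30問": to_text(30),
--         "40問": to_text(40),
--     }
-- ===== SOURCE B (Python) =====
-- def build_survey_versions_from_rows(rows: list[dict]) -> dict: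
--     """One incremental pass: sort once, walk the sorted rows with a 1-based
--     counter, growing a single running `lines` list; snapshot the joined text
--     when the counter hits a cutoff, and default missing cutoffs to the full
--     join (a cutoff beyond len(rows) behaves like the whole list)."""
--     if not rows:
--         return {"10問": "", "20問": "", "30問": "", "40問": ""}
--
--     def key_fn(r: dict):
--         return (
--             int(r.get("priority", 3)),
--             str(r.get("sq_id", "")),
--             str(r.get("var_name", "")),
--             str(r.get("item_text", "")),
--         )
--
--     snapshots = {}
--     lines = []
--     for i, r in enumerate(sorted(rows, key=key_fn), 1):
--         item = r.get("item_text", "")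
--         if item:
--             lines.append(f"・[{r.get('sq_id', '')}] {item}")
--         if i in (10, 20, 30, 40):
--             snapshots[i] = "\n".join(lines)
--     full = "\n".join(lines)
--     return {f"{n}問": snapshots.get(n, full) for n in (10, 20, 30, 40)}
-- ===== Notes on version B (the rewrite author's own statement) =====
-- stated objective: alternative
-- what changed: B sorts once and then makes a single incremental pass with a 1-based counter, snapshotting the running joined text at each cutoff and defaulting missing cutoffs to the full join, instead of A's four separate rebuilds from sorted_rows[:n].
import Mathlib
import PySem

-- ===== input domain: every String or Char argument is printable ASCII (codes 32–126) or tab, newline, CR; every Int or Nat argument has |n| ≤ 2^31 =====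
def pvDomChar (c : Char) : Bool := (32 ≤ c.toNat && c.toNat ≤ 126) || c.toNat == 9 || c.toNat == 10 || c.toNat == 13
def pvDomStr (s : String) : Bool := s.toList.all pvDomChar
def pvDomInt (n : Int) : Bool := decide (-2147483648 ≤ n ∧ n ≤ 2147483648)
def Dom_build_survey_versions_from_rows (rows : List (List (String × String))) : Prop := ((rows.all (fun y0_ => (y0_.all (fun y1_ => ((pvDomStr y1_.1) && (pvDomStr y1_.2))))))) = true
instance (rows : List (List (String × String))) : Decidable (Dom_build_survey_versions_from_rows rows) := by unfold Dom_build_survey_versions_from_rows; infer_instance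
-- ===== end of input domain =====

-- B sorts once and makes ONE incremental pass with a 1-based counter, snapshotting the running
-- joined text at each cutoff (missing cutoffs default to the full join), instead of A's four
-- rebuilds from sorted_rows[:n] (objective: alternative decomposition, same results).

-- ===== PORT A =====

-- r.get(k, dflt) on a dict of strings (assoc list, first match)
def pvGetRow (r : List (String × String)) (k dflt : String) : String :=
  ((r.find? (fun p => p.1 == k)).map (·.2)).getD dflt

-- key_fn(r): (int(r.get("priority", 3)), str(r.get("sq_id","")), str(r.get("var_name","")), str(r.get("item_text","")))
-- int() of a present value is totalized with .getD 0; Pre_ excludes rows where int() would raise ValueError.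
def pvRowKey (r : List (String × String)) : Int × String × String × String :=
  ((match r.find? (fun p => p.1 == "priority") with
    | none => (3 : Int)
    | some p => (PySem.Int.ofStr? p.2).getD 0),
   pvGetRow r "sq_id" "", pvGetRow r "var_name" "", pvGetRow r "item_text" "")

-- Python's `<` on the 4-tuple key: lexicographic, components compared by == / <
def pvKeyLt (a b : Int × String × String × String) : Bool :=
  a.1 < b.1 || (a.1 == b.1 && (a.2.1 < b.2.1 || (a.2.1 == b.2.1 &&
    (a.2.2.1 < b.2.2.1 || (a.2.2.1 == b.2.2.1 && a.2.2.2 < b.2.2.2)))))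

-- sorted(rows, key=key_fn): PySem's stable sort in its sorted_eq_foldl_insertBy form, tuple key
def pvSortRows (rows : List (List (String × String))) : List (List (String × String)) :=
  rows.foldl (fun acc x => PySem.List.insertBy (fun a b => pvKeyLt (pvRowKey a) (pvRowKey b)) x acc) []

-- body of the `for r in picked:` loop of A's to_text
def pvLineStep (lines : List String) (r : List (String × String)) : List String :=
  let sq := pvGetRow r "sq_id" ""
  let item := pvGetRow r "item_text" ""
  if item == "" then lines else lines ++ ["・[" ++ sq ++ "] " ++ item]

def build_survey_versions_from_rows (rows : List (List (String × String))) : List (String × String) :=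
  if rows = [] then [("10問", ""), ("20問", ""), ("30問", ""), ("40問", "")]
  else
    let sorted_rows := pvSortRows rows
    -- to_text(n): picked = sorted_rows[:n]; loop building lines; "\n".join(lines)
    let to_text := fun (n : Nat) =>
      PySem.Str.join "\n" ((sorted_rows.take n).foldl pvLineStep [])
    [("10問", to_text 10), ("20問", to_text 20), ("30問", to_text 30), ("40問", to_text 40)]

-- ===== PORT B =====

-- B's single `for i, r in enumerate(sorted(...), 1)` loop, as structural recursion on the
-- remaining rows carrying (counter, running lines, snapshots dict keyed by cutoff).
def pvAltWalk : List (List (String × String)) → Nat → List String → PySem.Dict Nat String →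
    List String × PySem.Dict Nat String
  | [], _, lines, snaps => (lines, snaps)
  | r :: rest, i, lines, snaps =>
      let item := pvGetRow r "item_text" ""
      let lines' := lines ++ (if item == "" then [] else ["・[" ++ pvGetRow r "sq_id" "" ++ "] " ++ item])
      let i' := i + 1
      let snaps' := if i' = 10 ∨ i' = 20 ∨ i' = 30 ∨ i' = 40
                    then snaps.insert i' (PySem.Str.join "\n" lines') else snaps
      pvAltWalk rest i' lines' snaps'

def build_survey_versions_from_rows_alt (rows : List (List (String × String))) : List (String × String) :=
  if rows = [] then [("10問", ""), ("20問", ""), ("30問", ""), ("40問", "")]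
  else
    let st := pvAltWalk (pvSortRows rows) 0 [] PySem.Dict.empty
    let full := PySem.Str.join "\n" st.1
    [("10問", st.2.getD 10 full), ("20問", st.2.getD 20 full),
     ("30問", st.2.getD 30 full), ("40問", st.2.getD 40 full)]

-- ===== PRECONDITION & SPEC =====
-- Pre_ excludes exactly the inputs where A raises ValueError: a row whose "priority" value is not a valid int() literal.
def Pre_build_survey_versions_from_rows (rows : List (List (String × String))) : Prop :=
  (rows.all (fun r => ((r.find? (fun p => p.1 == "priority")).all
    (fun p => (PySem.Int.ofStr? p.2).isSome)))) = true
instance (rows : List (List (String × String))) : Decidable (Pre_build_survey_versions_from_rows rows) := by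
  unfold Pre_build_survey_versions_from_rows; infer_instance

def pvWitness_build_survey_versions_from_rows : (List (List (String × String))) :=
  [[("priority", "2"), ("sq_id", "q1"), ("item_text", "aa")], [("sq_id", "q2"), ("item_text", "")]]

def Spec_build_survey_versions_from_rows (rows : List (List (String × String))) (out : List (String × String)) : Prop := out = build_survey_versions_from_rows_alt rows
instance (rows : List (List (String × String))) (out : List (String × String)) : Decidable (Spec_build_survey_versions_from_rows rows out) := by unfold Spec_build_survey_versions_from_rows; infer_instance

-- ===== CLAIM (what is proved, stated in full; the proofs are below) =====
def Claim_equal_build_survey_versions_from_rows : Prop := ∀ (rows : List (List (String × String))), Dom_build_survey_versions_from_rows rows → Pre_build_survey_versions_from_rows rows → Spec_build_survey_versions_from_rows rows (build_survey_versions_from_rows rows)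

-- ===== LEMMAS AND PROOFS =====

-- the line produced by one row, if any
def pvLineOf (r : List (String × String)) : Option String :=
  if pvGetRow r "item_text" "" == "" then none
  else some ("・[" ++ pvGetRow r "sq_id" "" ++ "] " ++ pvGetRow r "item_text" "")

theorem pvLineStep_eq (lines : List String) (r : List (String × String)) :
    pvLineStep lines r = lines ++ (pvLineOf r).toList := by
  unfold pvLineStep pvLineOf
  by_cases h : pvGetRow r "item_text" "" = "" <;> simp [h]

theorem foldl_pvLineStep (l : List (List (String × String))) (acc : List String) :
    l.foldl pvLineStep acc = acc ++ l.filterMap pvLineOf := by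
  induction l generalizing acc with
  | nil => simp
  | cons r t ih =>
      simp only [List.foldl_cons, List.filterMap_cons, ih, pvLineStep_eq]
      cases pvLineOf r <;> simp

-- the pass's lines accumulator: everything appended, in order
theorem pvAltWalk_lines (s : List (List (String × String))) (i : Nat) (lines : List String)
    (snaps : PySem.Dict Nat String) :
    (pvAltWalk s i lines snaps).1 = lines ++ s.filterMap pvLineOf := by
  induction s generalizing i lines snaps with
  | nil => simp [pvAltWalk]
  | cons r t ih =>
      unfold pvAltWalk
      simp only [ih, pvLineOf]
      by_cases h : pvGetRow r "item_text" "" = "" <;> simp [h]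

-- the snapshots dict: cutoff n is recorded iff the counter passes it, with the join of the lines so far
theorem pvAltWalk_snaps (n : Nat) (hn : n = 10 ∨ n = 20 ∨ n = 30 ∨ n = 40)
    (s : List (List (String × String))) (i : Nat) (lines : List String)
    (snaps : PySem.Dict Nat String) :
    (pvAltWalk s i lines snaps).2.get? n =
      if i < n ∧ n ≤ i + s.length then
        some (PySem.Str.join "\n" (lines ++ (s.take (n - i)).filterMap pvLineOf))
      else snaps.get? n := by
  induction s generalizing i lines snaps with
  | nil =>
      simp only [pvAltWalk, List.length_nil, Nat.add_zero]
      have : ¬ (i < n ∧ n ≤ i) := by omega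
      simp [this]
  | cons r t ih =>
      unfold pvAltWalk
      simp only []
      rw [ih]
      set line := (if pvGetRow r "item_text" "" == "" then ([] : List String)
        else ["・[" ++ pvGetRow r "sq_id" "" ++ "] " ++ pvGetRow r "item_text" ""]) with hline
      have hl : (pvLineOf r).toList = line := by
        unfold pvLineOf
        by_cases h : pvGetRow r "item_text" "" = "" <;> simp [hline, h]
      by_cases h1 : i + 1 < n
      · have hc : (i + 1 < n ∧ n ≤ i + 1 + t.length) ↔ (i < n ∧ n ≤ i + (r :: t).length) := by
          simp only [List.length_cons]; omega
        by_cases h2 : i + 1 < n ∧ n ≤ i + 1 + t.length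
        · simp only [if_pos h2, if_pos (hc.mp h2)]
          have htake : (r :: t).take (n - i) = r :: t.take (n - (i + 1)) := by
            have : n - i = (n - (i + 1)) + 1 := by omega
            rw [this, List.take_succ_cons]
          rw [htake, ← hl]
          cases hln : pvLineOf r <;> simp [hln]
        · simp only [if_neg h2, if_neg (fun hh => h2 (hc.mpr hh))]
          split
          · exact PySem.Dict.get?_insert_of_ne _ _ (by omega)
          · rfl
      · by_cases h0 : i + 1 = n
        · -- the counter hits the cutoff exactly at this row
          have hcut : i + 1 = 10 ∨ i + 1 = 20 ∨ i + 1 = 30 ∨ i + 1 = 40 := by omega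
          have hnot : ¬ (i + 1 < n ∧ n ≤ i + 1 + t.length) := by omega
          have hyes : i < n ∧ n ≤ i + (r :: t).length := by
            simp only [List.length_cons]; omega
          simp only [if_neg hnot, if_pos hyes, if_pos hcut]
          rw [h0, PySem.Dict.get?_insert_self]
          have htake : (r :: t).take (n - i) = [r] := by
            have : n - i = 1 := by omega
            simp [this]
          rw [htake, ← hl]
          cases hln : pvLineOf r <;> simp [hln]
        · -- counter already past n: nothing touches key n any more
          have hnot1 : ¬ (i + 1 < n ∧ n ≤ i + 1 + t.length) := by omega
          have hnot2 : ¬ (i < n ∧ n ≤ i + (r :: t).length) := by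
            simp only [List.length_cons]; omega
          simp only [if_neg hnot1, if_neg hnot2]
          split
          · exact PySem.Dict.get?_insert_of_ne _ _ (by omega)
          · rfl

-- one cutoff's output value: B's getD equals A's join of the taken prefix
theorem pv_cutoff_eq (s : List (List (String × String))) (n : Nat)
    (hn : n = 10 ∨ n = 20 ∨ n = 30 ∨ n = 40) :
    ((pvAltWalk s 0 [] PySem.Dict.empty).2).getD n
        (PySem.Str.join "\n" (pvAltWalk s 0 [] PySem.Dict.empty).1)
      = PySem.Str.join "\n" ((s.take n).foldl pvLineStep []) := by
  rw [foldl_pvLineStep, PySem.Dict.getD_eq_get?_getD,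
    pvAltWalk_snaps n hn s 0 [] PySem.Dict.empty, pvAltWalk_lines]
  simp only [Nat.zero_add, Nat.sub_zero, List.nil_append]
  by_cases h : 0 < n ∧ n ≤ s.length
  · simp [h]
  · have hlen : s.length < n := by omega
    have : s.take n = s := List.take_of_length_le (by omega)
    simp [h, this, PySem.Dict.get?_empty]

theorem build_survey_versions_from_rows_spec : Claim_equal_build_survey_versions_from_rows := by
  intro rows _ _
  unfold Spec_build_survey_versions_from_rows
  unfold build_survey_versions_from_rows build_survey_versions_from_rows_alt
  by_cases h : rows = []
  · simp [h]
  · simp only [if_neg h]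
    rw [pv_cutoff_eq _ 10 (by omega), pv_cutoff_eq _ 20 (by omega),
      pv_cutoff_eq _ 30 (by omega), pv_cutoff_eq _ 40 (by omega)]
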